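-- pv_equiv track=rewrite | github.com/aren250/aren | Python/200_Exercises/21_sPoNgEcAsE/base.py | to_spongecase
-- ===== SOURCE A (Python) =====
-- def to_spongecase(text):
--     """
--     Converts input text into spongecase (alternating uppercase and lowercase letters).
--     Non-alphabetic characters remain unchanged.
--     """
--     spongecase_text = []
--
--     i = 0
--     for char in text:
--         if char.isalpha():
--
--             if i % 2 == 0:
--                 spongecase_text.append(char.lower())
--             else:
--                 spongecase_text.append(char.upper())
--             i += 1
--         else:
--
--             spongecase_text.append(char)
--
--     return "".join(spongecase_text)
-- ===== SOURCE B (Python) =====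
-- def to_spongecase(text):
--     """
--     Converts input text into spongecase (alternating uppercase and lowercase letters).
--     Non-alphabetic characters remain unchanged.
--     """
--     letters = [c for c in text if c.isalpha()]
--     cased = []
--     while letters:
--         cased.append(letters[0].lower())
--         if len(letters) > 1:
--             cased.append(letters[1].upper())
--         letters = letters[2:]
--     it = iter(cased)
--     return "".join(next(it) if c.isalpha() else c for c in text)
-- ===== Notes on version B (the rewrite author's own statement) =====
-- stated objective: alternative
-- what changed: Replaces A's single counter-carrying pass with a split/transform/merge pipeline: extract the letter stream, case it by consuming the letters two at a time (lower the first of each pair, upper the second, no parity counter or mod), then merge the cased stream back into the text via an iterator.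
import Mathlib
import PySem

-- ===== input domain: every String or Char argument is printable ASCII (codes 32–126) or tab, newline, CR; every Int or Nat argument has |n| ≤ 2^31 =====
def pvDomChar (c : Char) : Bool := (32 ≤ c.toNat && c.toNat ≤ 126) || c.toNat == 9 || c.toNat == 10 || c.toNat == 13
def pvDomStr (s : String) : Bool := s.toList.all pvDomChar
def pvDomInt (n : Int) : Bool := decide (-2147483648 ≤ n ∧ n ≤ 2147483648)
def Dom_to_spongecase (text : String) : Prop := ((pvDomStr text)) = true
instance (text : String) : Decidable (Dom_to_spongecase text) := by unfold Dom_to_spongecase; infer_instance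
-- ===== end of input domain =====

-- B is a split/transform/merge pipeline: extract the letters, case them two at a
-- time (lower/upper per pair, no parity counter), merge back (objective: alternative).

-- ===== PORT A =====
-- A's list of one-character strings is a List Char; "".join(…) = String.mk.
def to_spongecase (text : String) : String :=
  let r := text.toList.foldl
    (fun (st : List Char × Int) char =>
      if PySem.Chars.isalpha char then
        if PySem.Int.mod st.2 2 == 0 then (st.1 ++ [PySem.Chars.lowerChar char], st.2 + 1)
        else (st.1 ++ [PySem.Chars.upperChar char], st.2 + 1)
      else (st.1 ++ [char], st.2))
    ([], 0)
  String.mk r.1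

-- ===== PORT B =====
-- the while loop consuming `letters` two at a time (letters[0], letters[1], letters[2:])
def pvPairCase : List Char → List Char
  | [] => []
  | [a] => [PySem.Chars.lowerChar a]
  | a :: b :: r => PySem.Chars.lowerChar a :: PySem.Chars.upperChar b :: pvPairCase r

-- the merging generator: `next(it)` consumes the head of the remaining cased letters;
-- the iterator is never exhausted when a letter is met (|cased| = number of letters),
-- so the [] branch is unreachable.
def pvMerge : List Char → List Char → List Char
  | [], _ => []
  | c :: cs, rem =>
    if PySem.Chars.isalpha c then
      match rem with
      | r :: rs => r :: pvMerge cs rs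
      | [] => pvMerge cs []
    else c :: pvMerge cs rem

def to_spongecase_alt (text : String) : String :=
  let letters := text.toList.filter (fun c => PySem.Chars.isalpha c)
  let cased := pvPairCase letters
  String.mk (pvMerge text.toList cased)

-- ===== PRECONDITION & SPEC =====
def Spec_to_spongecase (text : String) (out : String) : Prop := out = to_spongecase_alt text
instance (text : String) (out : String) : Decidable (Spec_to_spongecase text out) := by unfold Spec_to_spongecase; infer_instance

-- ===== CLAIM (what is proved, stated in full; the proofs are below) =====
def Claim_equal_to_spongecase : Prop := ∀ (text : String), Dom_to_spongecase text → Spec_to_spongecase text (to_spongecase text)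

-- ===== LEMMAS AND PROOFS =====

-- reference recursion: spongecased list, `low` = next letter goes lowercase
def pvSponge : List Char → Bool → List Char
  | [], _ => []
  | c :: cs, low =>
    if PySem.Chars.isalpha c then
      (if low then PySem.Chars.lowerChar c else PySem.Chars.upperChar c) :: pvSponge cs (!low)
    else c :: pvSponge cs low

theorem pvParityFlip (i : Int) :
    (PySem.Int.mod (i + 1) 2 == 0) = !(PySem.Int.mod i 2 == 0) := by
  simp only [PySem.Int.mod_eq_emod_of_pos (show (0:Int) < 2 by norm_num)]
  rcases Int.emod_two_eq i with h | h
  · have h1 : (i + 1) % 2 = 1 := by omega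
    simp [h, h1]
  · have h1 : (i + 1) % 2 = 0 := by omega
    simp [h, h1]

theorem pvFoldA (cs : List Char) :
    ∀ (acc : List Char) (i : Int),
      (cs.foldl
        (fun (st : List Char × Int) char =>
          if PySem.Chars.isalpha char then
            if PySem.Int.mod st.2 2 == 0 then (st.1 ++ [PySem.Chars.lowerChar char], st.2 + 1)
            else (st.1 ++ [PySem.Chars.upperChar char], st.2 + 1)
          else (st.1 ++ [char], st.2))
        (acc, i)).1 = acc ++ pvSponge cs (PySem.Int.mod i 2 == 0) := by
  induction cs with
  | nil => intro acc i; simp [pvSponge]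
  | cons c cs ih =>
    intro acc i
    simp only [List.foldl_cons, pvSponge]
    by_cases h : PySem.Chars.isalpha c
    · by_cases h2 : PySem.Int.mod i 2 == 0
      · rw [if_pos h, if_pos h, if_pos h2, ih]
        simp only [pvParityFlip, h2]
        simp
      · rw [if_pos h, if_pos h, if_neg h2, ih]
        have hf : (PySem.Int.mod i 2 == 0) = false := by simpa using h2
        simp only [pvParityFlip, hf]
        simp
    · rw [if_neg h, if_neg h, ih]; simp

-- alternating-case recursion on the letter stream
def pvCaseAlt : List Char → Bool → List Char
  | [], _ => []
  | a :: r, low =>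
    (if low then PySem.Chars.lowerChar a else PySem.Chars.upperChar a) :: pvCaseAlt r (!low)

theorem pvPairCase_eq (l : List Char) : pvPairCase l = pvCaseAlt l true := by
  induction l using pvPairCase.induct with
  | case1 => simp [pvPairCase, pvCaseAlt]
  | case2 a => simp [pvPairCase, pvCaseAlt]
  | case3 a b r ih => simp [pvPairCase, pvCaseAlt, ih]

theorem pvMerge_eq (cs : List Char) :
    ∀ (low : Bool),
      pvMerge cs (pvCaseAlt (cs.filter (fun c => PySem.Chars.isalpha c)) low)
        = pvSponge cs low := by
  induction cs with
  | nil => intro low; simp [pvMerge, pvSponge]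
  | cons c cs ih =>
    intro low
    by_cases h : PySem.Chars.isalpha c
    · simp only [List.filter_cons, h, if_pos, pvCaseAlt, pvMerge, pvSponge]
      simp [ih]
    · simp only [List.filter_cons, pvMerge, pvSponge]
      simp [h, ih]

-- ===== VERDICT (by name: the statement is the Claim_ definition above) =====
theorem to_spongecase_spec : Claim_equal_to_spongecase := by
  intro text _
  unfold Spec_to_spongecase to_spongecase to_spongecase_alt
  simp only []
  rw [pvFoldA text.toList [] 0, pvPairCase_eq, pvMerge_eq]
  norm_num [PySem.Int.mod]
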